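-- pv_equiv track=rewrite | github.com/johnkcarey11/jumble_solver | jumble_solver.py | separate_words_by_len
-- ===== SOURCE A (Python) =====
-- def separate_words_by_len(words: list, n: int) -> dict[int, dict[str, list[str]]]:
--     """Groups words from a given list by length.
--
--     Only groups words shorter than n. Groups words of each length into a
--     dictionary with the strings as keys and lists of letters as values. Returns a dictionary
--     with word length as keys and the dictionaries of words and sorted letters as values.
--
--     Args:
--         words: a list of strings, each of which will be a word
--         n: an int which is the maximum length of string to include in the output
--     Returns:
--         A dictionary mapping word length to a dictionary mapping strings of that word length
--         to their letters (sorted). For example: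
--         {1: {'a': ['a'], 'i': ['i']},
--          2: {'to': ['o','t'], 'it': ['i','t']},
--          3: {'the': ['e', 'h', 't'], 'got': ['g','o', 't']}
--          }
--     """
--     words_by_length: dict[int, dict[str, list[str]]] = {}
--
--     # create a dictionary for each word length up to n
--     for i in range(1, n+1):
--         words_by_length[i] = {}
--
--     # populate each length-specific dictionary with the words of that length (and their letters)
--     for word in words:
--         word = word.lower()
--         word_length = len(word)
--
--         # only include words with length less than or equal to the given value
--         if 0 < word_length <= n:
--             words_by_length[word_length][word] = sorted(word)
--
--     return words_by_length
-- ===== SOURCE B (Python) =====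
-- def separate_words_by_len(words: list, n: int) -> dict[int, dict[str, list[str]]]:
--     """Length-indexed nested comprehension: for each length 1..n, scan the
--     word list for words of exactly that length."""
--     return {
--         i: {w.lower(): sorted(w.lower()) for w in words if len(w.lower()) == i}
--         for i in range(1, n + 1)
--     }
-- ===== Notes on version B (the rewrite author's own statement) =====
-- stated objective: idiomatic
-- what changed: A makes one bucketing pass over the words, pre-creating and then destructively updating a dict of per-length dicts; B is a nested comprehension that iterates lengths 1..n on the outside and rescans the word list once per length, building each inner dict directly.
import Mathlib
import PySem

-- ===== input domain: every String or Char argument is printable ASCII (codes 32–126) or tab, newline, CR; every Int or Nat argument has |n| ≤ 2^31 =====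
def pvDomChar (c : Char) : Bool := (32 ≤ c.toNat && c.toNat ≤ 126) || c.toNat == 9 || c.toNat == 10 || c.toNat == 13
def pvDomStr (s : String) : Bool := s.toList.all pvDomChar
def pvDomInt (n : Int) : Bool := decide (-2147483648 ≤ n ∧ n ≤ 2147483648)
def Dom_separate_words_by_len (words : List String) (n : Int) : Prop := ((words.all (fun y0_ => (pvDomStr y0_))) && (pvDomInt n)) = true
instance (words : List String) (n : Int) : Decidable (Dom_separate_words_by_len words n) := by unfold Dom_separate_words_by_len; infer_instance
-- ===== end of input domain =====

-- B replaces A's single bucketing pass over the words with an idiomatic nested comprehension: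
-- lengths 1..n on the outside, a scan of the word list for each length on the inside.

-- sorted(word) for a string: the list of its one-character strings, sorted (shared by both ports)
def pvSortedLetters (w : String) : List String :=
  PySem.List.sorted (w.toList.map (fun c => String.ofList [c])) (fun x => x) false

-- ===== PORT A =====
-- words_by_length[word_length][word] = sorted(word): word_length is always a key here
-- (inserted by the first loop), so the in-place inner update is Dict.modify.
def separate_words_by_len (words : List String) (n : Int) : List (Int × List (String × List String)) :=
  let init : PySem.Dict Int (PySem.Dict String (List String)) :=
    (PySem.List.pyRange 1 (n+1) 1).foldl (fun d i => d.insert i PySem.Dict.empty) PySem.Dict.empty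
  let d := words.foldl (fun d word0 =>
      let word := PySem.Str.lower word0
      let wl : Int := PySem.Str.len word
      if 0 < wl ∧ wl ≤ n then
        d.modify wl PySem.Dict.empty (fun inner => inner.insert word (pvSortedLetters word))
      else d) init
  d.items.map (fun p => (p.1, p.2.items))

-- ===== PORT B =====
def separate_words_by_len_alt (words : List String) (n : Int) : List (Int × List (String × List String)) :=
  (PySem.List.pyRange 1 (n+1) 1).map (fun i =>
    (i, (words.foldl (fun d w =>
          if PySem.Str.len (PySem.Str.lower w) = i then
            d.insert (PySem.Str.lower w) (pvSortedLetters (PySem.Str.lower w))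
          else d) (PySem.Dict.empty : PySem.Dict String (List String))).items))

-- ===== PRECONDITION & SPEC =====
def Spec_separate_words_by_len (words : List String) (n : Int) (out : List (Int × List (String × List String))) : Prop := out = separate_words_by_len_alt words n
instance (words : List String) (n : Int) (out : List (Int × List (String × List String))) : Decidable (Spec_separate_words_by_len words n out) := by unfold Spec_separate_words_by_len; infer_instance

-- ===== CLAIM (what is proved, stated in full; the proofs are below) =====
def Claim_equal_separate_words_by_len : Prop := ∀ (words : List String) (n : Int), Dom_separate_words_by_len words n → Spec_separate_words_by_len words n (separate_words_by_len words n)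

-- ===== LEMMAS AND PROOFS =====

-- init loop: every slot holds the empty inner dict
theorem pv_getD_foldl_insert_empty (R : List Int)
    (d : PySem.Dict Int (PySem.Dict String (List String))) (k : Int)
    (h : d.getD k PySem.Dict.empty = PySem.Dict.empty) :
    (R.foldl (fun d i => d.insert i PySem.Dict.empty) d).getD k PySem.Dict.empty
      = PySem.Dict.empty := by
  induction R generalizing d with
  | nil => exact h
  | cons i R ih =>
    simp only [List.foldl_cons]
    exact ih _ (by rw [PySem.Dict.getD_insert]; split_ifs <;> simp [h])

-- keys of the init loop (keys_foldl_insert specialised to a constant value)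
theorem pv_keys_foldl_insert_const (R : List Int)
    (d : PySem.Dict Int (PySem.Dict String (List String))) :
    (R.foldl (fun d i => d.insert i PySem.Dict.empty) d).keys = PySem.Set.update d.keys R :=
  PySem.Dict.keys_foldl_insert R (fun _ _ => PySem.Dict.empty) d

-- keys of the bucketing loop (keys_foldl_modify_key specialised)
theorem pv_keys_foldl_modify (ws : List String) (keyf : String → Int)
    (vk : String → String) (vv : String → List String)
    (d : PySem.Dict Int (PySem.Dict String (List String))) :
    (ws.foldl (fun d w => d.modify (keyf w) PySem.Dict.empty
        (fun inner => inner.insert (vk w) (vv w))) d).keys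
      = PySem.Set.update d.keys (ws.map keyf) :=
  PySem.Dict.keys_foldl_modify_key ws keyf PySem.Dict.empty
    (fun _ w inner => inner.insert (vk w) (vv w)) d

-- the bucketing loop, read off at one key k: the inner fold over the words whose key is k
theorem pv_getD_foldl_modify_insert (keyf : String → Int) (vk : String → String)
    (vv : String → List String) (ws : List String)
    (d : PySem.Dict Int (PySem.Dict String (List String))) (k : Int) :
    (ws.foldl (fun d w => d.modify (keyf w) PySem.Dict.empty
        (fun inner => inner.insert (vk w) (vv w))) d).getD k PySem.Dict.empty
      = (ws.filter (fun w => keyf w == k)).foldl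
          (fun inner w => inner.insert (vk w) (vv w)) (d.getD k PySem.Dict.empty) := by
  induction ws generalizing d with
  | nil => rfl
  | cons w ws ih =>
    simp only [List.foldl_cons, List.filter_cons]
    by_cases h : keyf w = k
    · simp [h, ih]
    · have h' : ¬ k = keyf w := fun hh => h hh.symm
      simp [h, h', ih, PySem.Dict.getD_modify]

-- ===== VERDICT (by name: the statement is the Claim_ definition above) =====
theorem separate_words_by_len_spec : Claim_equal_separate_words_by_len := by
  intro words n _
  show separate_words_by_len words n = separate_words_by_len_alt words n
  simp only [separate_words_by_len, separate_words_by_len_alt]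
  have hA : ∀ init : PySem.Dict Int (PySem.Dict String (List String)),
      List.foldl (fun d word0 =>
        if 0 < PySem.Str.len (PySem.Str.lower word0) ∧ PySem.Str.len (PySem.Str.lower word0) ≤ n then
          d.modify (PySem.Str.len (PySem.Str.lower word0)) PySem.Dict.empty
            (fun inner => inner.insert (PySem.Str.lower word0) (pvSortedLetters (PySem.Str.lower word0)))
        else d) init words
      = List.foldl (fun d word0 =>
          d.modify (PySem.Str.len (PySem.Str.lower word0)) PySem.Dict.empty
            (fun inner => inner.insert (PySem.Str.lower word0) (pvSortedLetters (PySem.Str.lower word0))))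
          init (words.filter (fun w =>
            decide (0 < PySem.Str.len (PySem.Str.lower w) ∧ PySem.Str.len (PySem.Str.lower w) ≤ n))) :=
    fun init => PySem.List.foldl_ite_eq_foldl_filter _ _ words init
  rw [hA]
  set R := PySem.List.pyRange 1 (n+1) 1 with hR
  set ws := words.filter (fun w =>
      decide (0 < PySem.Str.len (PySem.Str.lower w) ∧ PySem.Str.len (PySem.Str.lower w) ≤ n)) with hws
  -- keys of the final dict are exactly R
  have hinitkeys : ((R.foldl (fun d i => d.insert i PySem.Dict.empty)
      (PySem.Dict.empty : PySem.Dict Int (PySem.Dict String (List String))))).keys = R := by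
    rw [pv_keys_foldl_insert_const, PySem.Dict.keys_empty, PySem.Set.update_nil_left,
        PySem.Set.ofList_eq_self_of_nodup _ (PySem.List.nodup_pyRange_one 1 (n+1))]
  have hkeys : ((ws.foldl (fun d w => d.modify (PySem.Str.len (PySem.Str.lower w)) PySem.Dict.empty
      (fun inner => inner.insert (PySem.Str.lower w) (pvSortedLetters (PySem.Str.lower w))))
      (R.foldl (fun d i => d.insert i PySem.Dict.empty) PySem.Dict.empty))).keys = R := by
    rw [pv_keys_foldl_modify ws (fun w => PySem.Str.len (PySem.Str.lower w))
          (fun w => PySem.Str.lower w) (fun w => pvSortedLetters (PySem.Str.lower w)),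
        hinitkeys, PySem.Set.update_eq_append_filter]
    have : (PySem.Set.ofList (ws.map (fun w => PySem.Str.len (PySem.Str.lower w)))).filter
        (fun y => !PySem.Set.contains R y) = [] := by
      rw [List.filter_eq_nil_iff]
      intro y hy
      rw [PySem.Set.mem_ofList] at hy
      obtain ⟨w, hw, rfl⟩ := List.mem_map.mp hy
      rw [hws, List.mem_filter] at hw
      have hc := of_decide_eq_true hw.2
      simp only [Bool.not_eq_true', Bool.not_eq_false]
      exact (PySem.Set.contains_iff R _).mpr (PySem.List.mem_pyRange_one.mpr ⟨by omega, by omega⟩)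
    rw [this, List.append_nil]
  rw [PySem.Dict.items_eq_map_keys _ (by rw [hkeys]; exact PySem.List.nodup_pyRange_one 1 (n+1))
        PySem.Dict.empty, hkeys, List.map_map]
  apply List.map_congr_left
  intro k hk
  obtain ⟨hk1, hk2⟩ := PySem.List.mem_pyRange_one.mp hk
  simp only [Function.comp]
  rw [pv_getD_foldl_modify_insert (fun w => PySem.Str.len (PySem.Str.lower w))
        (fun w => PySem.Str.lower w) (fun w => pvSortedLetters (PySem.Str.lower w)),
      pv_getD_foldl_insert_empty R _ k (by simp [PySem.Dict.getD_empty]),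
      show List.foldl (fun d w =>
          if PySem.Str.len (PySem.Str.lower w) = k then
            d.insert (PySem.Str.lower w) (pvSortedLetters (PySem.Str.lower w))
          else d) PySem.Dict.empty words
        = List.foldl (fun d w => d.insert (PySem.Str.lower w) (pvSortedLetters (PySem.Str.lower w)))
            PySem.Dict.empty (words.filter (fun w => decide (PySem.Str.len (PySem.Str.lower w) = k)))
        from PySem.List.foldl_ite_eq_foldl_filter _ _ words _,
      hws, List.filter_filter]
  refine congrArg (fun l => (k, (List.foldl
      (fun d w => d.insert (PySem.Str.lower w) (pvSortedLetters (PySem.Str.lower w)))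
      (PySem.Dict.empty : PySem.Dict String (List String)) l).items)) (List.filter_congr ?_)
  intro w _
  generalize PySem.Str.len (PySem.Str.lower w) = m
  by_cases hm : m = k
  · subst hm
    simp only [beq_self_eq_true, Bool.true_and, decide_eq_true_eq, decide_true]
    exact ⟨by omega, by omega⟩
  · simp [hm]
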